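-- pv_equiv track=rewrite | github.com/elevate-foundry/gods-as-centroids | mlx-pipeline/frontier_judge.py | braille_unicode
-- ===== SOURCE A (Python) =====
-- def braille_unicode(bits: list) -> str:
--     """Convert 72 bits to 12 braille unicode characters."""
--     chars = []
--     offsets = [1, 2, 4, 8, 16, 32]
--     for i in range(12):
--         cell_bits = bits[i*6:(i+1)*6]
--         code = 0x2800
--         for j, b in enumerate(cell_bits):
--             if b:
--                 code += offsets[j]
--         chars.append(chr(code))
--     return "".join(chars)
-- ===== SOURCE B (Python) =====
-- def braille_unicode(bits: list) -> str:
--     """Convert 72 bits to 12 braille unicode characters."""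
--     v = 0
--     for k, b in enumerate(bits):
--         if k >= 72:
--             break
--         if b:
--             v += 1 << k
--     return "".join(chr(0x2800 + ((v >> (6 * i)) & 63)) for i in range(12))
-- ===== Notes on version B (the rewrite author's own statement) =====
-- stated objective: alternative
-- what changed: Replaces A's nested per-cell loops over slices and an offsets table by packing the first 72 bits' truthiness into one integer in a single pass, then extracting each braille cell as a 6-bit field via shift-and-mask.
import Mathlib
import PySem

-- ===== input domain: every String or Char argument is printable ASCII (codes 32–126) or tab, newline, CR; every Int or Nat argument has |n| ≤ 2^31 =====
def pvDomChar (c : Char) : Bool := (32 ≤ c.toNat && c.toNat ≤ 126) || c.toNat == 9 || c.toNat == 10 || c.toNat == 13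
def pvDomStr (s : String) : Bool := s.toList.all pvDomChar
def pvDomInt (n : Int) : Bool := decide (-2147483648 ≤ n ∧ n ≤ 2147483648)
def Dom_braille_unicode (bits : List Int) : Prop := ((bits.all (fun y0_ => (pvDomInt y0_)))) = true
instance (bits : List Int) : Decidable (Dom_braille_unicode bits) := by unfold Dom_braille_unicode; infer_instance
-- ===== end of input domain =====

-- B packs the first 72 bits into one integer and extracts each cell by shift-and-mask,
-- instead of A's nested loops over 12 slices with an offsets table (objective: alternative).

-- ===== PORT A =====
-- literal port of A: loop i in range(12), slice bits[i*6:(i+1)*6], inner loop over enumerate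
-- with an offsets-table lookup (offsets[j]; j < 6 always holds, the lookup is total here,
-- ported as pyGet? with default 0 — never taken).
def braille_unicode (bits : List Int) : String :=
  let offsets : List Int := [1, 2, 4, 8, 16, 32]
  let chars : List Char :=
    (PySem.List.pyRange 0 12 1).foldl (fun acc i =>
      let cell_bits := PySem.List.slice bits (some (i * 6)) (some ((i + 1) * 6))
      let code : Int :=
        (PySem.List.enumerate cell_bits).foldl (fun c jb =>
          if jb.2 ≠ 0 then c + ((PySem.List.pyGet? offsets jb.1).getD 0) else c) 0x2800
      acc ++ [Char.ofNat code.toNat]) []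
  String.ofList chars

-- ===== PORT B =====
-- B-side helper: the single pass 'for k, b in enumerate(bits): if k >= 72: break; if b: v += 1 << k'
def packBits : List Int → Nat → Nat → Nat
  | [], _, v => v
  | b :: rest, k, v =>
    if 72 ≤ k then v
    else packBits rest (k + 1) (if b ≠ 0 then v + (1 <<< k) else v)

def braille_unicode_alt (bits : List Int) : String :=
  let v := packBits bits 0 0
  String.ofList ((List.range 12).map (fun i => Char.ofNat (0x2800 + ((v >>> (6 * i)) &&& 63))))

-- ===== PRECONDITION & SPEC =====
def Spec_braille_unicode (bits : List Int) (out : String) : Prop := out = braille_unicode_alt bits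
instance (bits : List Int) (out : String) : Decidable (Spec_braille_unicode bits out) := by unfold Spec_braille_unicode; infer_instance

-- ===== CLAIM (what is proved, stated in full; the proofs are below) =====
def Claim_equal_braille_unicode : Prop := ∀ (bits : List Int), Dom_braille_unicode bits → Spec_braille_unicode bits (braille_unicode bits)

-- ===== LEMMAS AND PROOFS =====

-- the per-cell value: Σ_j [bits_j ≠ 0] · 2^j over a cell's bits
def cellval : List Int → Nat
  | [] => 0
  | b :: r => (if b ≠ 0 then 1 else 0) + 2 * cellval r

-- packBits accumulates the base-2 value of the truthiness of the first 72 bits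
theorem packBits_eq (l : List Int) : ∀ (k v : Nat), k ≤ 72 →
    packBits l k v = v + 2 ^ k * cellval (l.take (72 - k)) := by
  induction l with
  | nil => intro k v _; simp [packBits, cellval]
  | cons b rest ih =>
    intro k v hk
    by_cases h72 : 72 ≤ k
    · have : k = 72 := le_antisymm hk h72
      subst this
      simp [packBits, cellval]
    · have hk1 : k + 1 ≤ 72 := by omega
      have hstep : 72 - k = (72 - (k + 1)) + 1 := by omega
      rw [packBits, if_neg h72, ih (k + 1) _ hk1, hstep, List.take_succ_cons, cellval]
      have h1 : (1 <<< k) = 2 ^ k := Nat.one_shiftLeft k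
      split_ifs with hb <;> simp [h1, pow_succ] <;> try ring

-- splitting cellval at position m
theorem cellval_split (l : List Int) (m : Nat) :
    cellval l = cellval (l.take m) + 2 ^ m * cellval (l.drop m) := by
  induction l generalizing m with
  | nil => simp [cellval]
  | cons b r ih =>
    cases m with
    | zero => simp [cellval]
    | succ m =>
      simp only [List.take_succ_cons, List.drop_succ_cons, cellval, ih m, pow_succ]
      ring

theorem cellval_take_lt (l : List Int) (m : Nat) : cellval (l.take m) < 2 ^ m := by
  induction l generalizing m with
  | nil => simp [cellval]
  | cons b r ih =>
    cases m with
    | zero => simp [cellval]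
    | succ m =>
      have := ih m
      simp only [List.take_succ_cons, cellval, pow_succ]
      split_ifs <;> omega

-- B's extraction of cell i is the cellval of the 6-bit chunk
theorem extract_eq (bits : List Int) (i : Nat) :
    (packBits bits 0 0 >>> (6 * i)) &&& 63 = cellval (((bits.take 72).drop (6 * i)).take 6) := by
  have hpack : packBits bits 0 0 = cellval (bits.take 72) := by
    simpa using packBits_eq bits 0 0 (by omega)
  set t := bits.take 72 with ht
  have hsplit := cellval_split t (6 * i)
  have hlt := cellval_take_lt t (6 * i)
  have hdiv : cellval t >>> (6 * i) = cellval (t.drop (6 * i)) := by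
    rw [Nat.shiftRight_eq_div_pow, hsplit, Nat.add_mul_div_left _ _ (by positivity),
      Nat.div_eq_of_lt hlt, Nat.zero_add]
  have hmod : cellval (t.drop (6 * i)) % 64 = cellval ((t.drop (6 * i)).take 6) := by
    have hs := cellval_split (t.drop (6 * i)) 6
    have hl := cellval_take_lt (t.drop (6 * i)) 6
    norm_num at hs hl ⊢
    omega
  have hand := Nat.and_two_pow_sub_one_eq_mod (cellval t >>> (6 * i)) 6
  norm_num at hand
  rw [hpack, hand, hdiv, hmod]

-- A's inner enumerate-fold computes 0x2800 + cellval
theorem innerfold_eq (c : List Int) (hc : c.length ≤ 6) :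
    ((PySem.List.enumerate c).foldl (fun acc jb =>
      if jb.2 ≠ 0 then acc + ((PySem.List.pyGet? ([1,2,4,8,16,32] : List Int) jb.1).getD 0) else acc)
      (0x2800 : Int)) = (0x2800 : Nat) + cellval c := by
  have key : ∀ (c : List Int) (s : Nat) (acc : Int), s + c.length ≤ 6 →
      ((PySem.List.enumerate c (s : Int)).foldl (fun acc jb =>
        if jb.2 ≠ 0 then acc + ((PySem.List.pyGet? ([1,2,4,8,16,32] : List Int) jb.1).getD 0) else acc)
        acc) = acc + (2 ^ s : Nat) * (cellval c : Int) := by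
    intro c
    induction c with
    | nil => intro s acc _; simp [PySem.List.enumerate_nil, cellval]
    | cons b r ih =>
      intro s acc hs
      have hs6 : s < 6 := by simp only [List.length_cons] at hs; omega
      have hget : ((PySem.List.pyGet? ([1,2,4,8,16,32] : List Int) (s : Int)).getD 0) = ((2 ^ s : Nat) : Int) := by
        interval_cases s <;> decide
      rw [PySem.List.enumerate_cons, List.foldl_cons]
      have hrec := ih (s + 1) (if b ≠ 0 then acc + ((PySem.List.pyGet? ([1,2,4,8,16,32] : List Int) (s : Int)).getD 0) else acc) (by simp only [List.length_cons] at hs; omega)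
      have hcast : ((s : Int) + 1) = (((s + 1 : Nat)) : Int) := by push_cast; ring
      rw [hcast, hrec, hget]
      simp only [cellval]
      split_ifs <;> push_cast <;> ring
  have h0 := key c 0 0x2800 (by omega)
  norm_num at h0 ⊢
  exact h0

-- flatten of a map to singletons is a map
theorem flatten_map_singleton {α β : Type} (l : List α) (f : α → β) :
    (l.map (fun x => [f x])).flatten = l.map f := by
  induction l <;> simp_all

-- one cell of A equals one cell of B
theorem cell_eq (bits : List Int) (k : Nat) (hk : k < 12) :
    Char.ofNat (((PySem.List.enumerate (PySem.List.slice bits (some ((k : Int) * 6)) (some (((k : Int) + 1) * 6)))).foldl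
        (fun acc jb =>
          if jb.2 = 0 then acc else acc + ((PySem.List.pyGet? ([1,2,4,8,16,32] : List Int) jb.1).getD 0))
        (0x2800 : Int)).toNat)
      = Char.ofNat (0x2800 + ((packBits bits 0 0 >>> (6 * k)) &&& 63)) := by
  have h1 : ((k : Int) * 6) = (((6 * k : Nat)) : Int) := by push_cast; ring
  have h2 : (((k : Int) + 1) * 6) = (((6 * k : Nat)) : Int) + ((6 : Nat) : Int) := by push_cast; ring
  rw [h1, h2, PySem.List.slice_natCast_add]
  set cb := (bits.drop (6 * k)).take 6 with hc
  have hlen : cb.length ≤ 6 := by simp [hc]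
  have hinner := innerfold_eq cb hlen
  simp only [ne_eq, ite_not] at hinner
  rw [hinner, extract_eq bits k]
  have hcell : cellval (((bits.take 72).drop (6 * k)).take 6) = cellval cb := by
    rw [List.drop_take, List.take_take]
    congr 2
    omega
  rw [hcell]
  congr 1

-- ===== VERDICT (by name: the statement is the Claim_ definition above) =====
theorem braille_unicode_spec : Claim_equal_braille_unicode := by
  intro bits _
  unfold Spec_braille_unicode braille_unicode braille_unicode_alt
  rw [PySem.List.pyRange_one]
  norm_num
  simp only [Function.comp_def, (show ((12 : Int)).toNat = 12 from rfl)]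
  rw [flatten_map_singleton]
  congr 1
  apply List.map_congr_left
  intro k hk
  exact cell_eq bits k (List.mem_range.mp hk)
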